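-- pv_equiv track=rewrite | github.com/aaronGeb/competitive-programming | 21-May-2025/Tram 358560.py | tram_min_capacity
-- ===== SOURCE A (Python) =====
-- def tram_min_capacity(n: int, stops: list[tuple[int, int]]) -> int:
--     current_passengers = 0
--     max_capacity = 0
--
--     for exit_count, enter_count in stops:
--         current_passengers -= exit_count
--         current_passengers += enter_count
--         max_capacity = max(max_capacity, current_passengers)
--
--     return max_capacity
-- ===== SOURCE B (Python) =====
-- def tram_min_capacity(n: int, stops: list[tuple[int, int]]) -> int:
--     # Right-to-left recursion on the suffix: the answer for a list of stops is
--     # max(0, delta_of_first_stop + answer_for_remaining_stops).  No running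
--     # passenger count is kept; correctness: the max prefix sum (floored at 0)
--     # satisfies exactly this recurrence.
--     best = 0
--     for exit_count, enter_count in reversed(stops):
--         best = max(0, (enter_count - exit_count) + best)
--     return best
-- ===== Notes on version B (the rewrite author's own statement) =====
-- stated objective: alternative
-- what changed: A sweeps forward maintaining a running passenger count and a separate running max; B iterates the stops in reverse with a single accumulator, using the suffix recurrence best = max(0, delta + best) (the answer recurrence of the max-prefix-sum), so no passenger count is ever materialized.
import Mathlib
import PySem

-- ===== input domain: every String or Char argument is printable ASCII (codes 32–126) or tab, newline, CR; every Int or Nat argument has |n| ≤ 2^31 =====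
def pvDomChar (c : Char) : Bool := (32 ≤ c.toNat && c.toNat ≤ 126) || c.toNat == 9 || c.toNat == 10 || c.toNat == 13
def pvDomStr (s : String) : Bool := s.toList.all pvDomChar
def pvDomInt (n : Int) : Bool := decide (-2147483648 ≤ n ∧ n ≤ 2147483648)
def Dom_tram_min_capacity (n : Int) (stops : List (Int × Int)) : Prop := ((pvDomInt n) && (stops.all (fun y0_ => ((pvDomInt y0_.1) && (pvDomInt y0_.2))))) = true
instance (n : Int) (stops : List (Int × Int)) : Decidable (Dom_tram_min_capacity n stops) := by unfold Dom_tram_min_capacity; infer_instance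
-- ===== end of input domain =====

-- B replaces A's forward running-count + running-max sweep by a reverse pass with one
-- accumulator using the suffix recurrence best = max(0, delta + best) (alternative decomposition, same cost).

-- ===== PORT A =====
-- state = (current_passengers, max_capacity); forward pass updating both
def tram_min_capacity (n : Int) (stops : List (Int × Int)) : Int :=
  (stops.foldl
    (fun (s : Int × Int) (p : Int × Int) =>
      let current := s.1 - p.1 + p.2
      (current, max s.2 current))
    (0, 0)).2

-- ===== PORT B =====
-- for exit, enter in reversed(stops): best = max(0, (enter - exit) + best)
def tram_min_capacity_alt (n : Int) (stops : List (Int × Int)) : Int :=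
  (stops.reverse).foldl (fun best p => max 0 ((p.2 - p.1) + best)) 0

-- ===== PRECONDITION & SPEC =====
def Spec_tram_min_capacity (n : Int) (stops : List (Int × Int)) (out : Int) : Prop := out = tram_min_capacity_alt n stops
instance (n : Int) (stops : List (Int × Int)) (out : Int) : Decidable (Spec_tram_min_capacity n stops out) := by unfold Spec_tram_min_capacity; infer_instance

-- ===== CLAIM (what is proved, stated in full; the proofs are below) =====
def Claim_equal_tram_min_capacity : Prop := ∀ (n : Int) (stops : List (Int × Int)), Dom_tram_min_capacity n stops → Spec_tram_min_capacity n stops (tram_min_capacity n stops)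

-- ===== LEMMAS AND PROOFS =====

-- B's reverse fold, rewritten as a right fold (suffix recurrence)
theorem alt_eq_foldr (n : Int) (stops : List (Int × Int)) :
    tram_min_capacity_alt n stops
      = stops.foldr (fun p best => max 0 ((p.2 - p.1) + best)) 0 := by
  unfold tram_min_capacity_alt
  rw [List.foldl_reverse]

-- the suffix recurrence is nonnegative
theorem foldr_nonneg (stops : List (Int × Int)) :
    0 ≤ stops.foldr (fun p best => max 0 ((p.2 - p.1) + best)) 0 := by
  cases stops with
  | nil => simp
  | cons p rest => simp

-- loop invariant: A's fold from state (c, m) with c ≤ m equals max m (c + suffix answer)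
theorem key (stops : List (Int × Int)) (c m : Int) (h : c ≤ m) :
    (stops.foldl
      (fun (s : Int × Int) (p : Int × Int) =>
        let current := s.1 - p.1 + p.2
        (current, max s.2 current))
      (c, m)).2
      = max m (c + stops.foldr (fun p best => max 0 ((p.2 - p.1) + best)) 0) := by
  induction stops generalizing c m with
  | nil =>
      simp only [List.foldl_nil, List.foldr_nil]
      omega
  | cons p rest ih =>
      simp only [List.foldl_cons, List.foldr_cons]
      rw [ih (c - p.1 + p.2) (max m (c - p.1 + p.2)) (le_max_right _ _)]
      have hr := foldr_nonneg rest
      omega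

-- ===== VERDICT (by name: the statement is the Claim_ definition above) =====
theorem tram_min_capacity_spec : Claim_equal_tram_min_capacity := by
  intro n stops _
  unfold Spec_tram_min_capacity tram_min_capacity
  rw [alt_eq_foldr, key stops 0 0 le_rfl]
  have hr := foldr_nonneg stops
  omega
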